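-- pv_equiv track=rewrite | github.com/veir-yt/AOC | helper/helper.py | hashes_equal
-- ===== SOURCE A (Python) =====
-- def hashes_equal(h1, h2):
--     for c in h1:
--         if c not in h2:
--             return False
--         if h2[c] != h1[c]:
--             return False
--
--     for c in h2:
--         if c not in h1:
--             return False
--         if h2[c] != h1[c]:
--             return False
--
--     return True
-- ===== SOURCE B (Python) =====
-- def hashes_equal(h1, h2):
--     if len(h1) != len(h2):
--         return False
--     return all(h2.get(k) == v for k, v in h1.items())
-- ===== Notes on version B (the rewrite author's own statement) =====
-- stated objective: simpler
-- what changed: A's two symmetric full scans (each checking membership and value in both directions) are replaced by one length comparison plus a single directional scan of h1 with h2.get, which is exactly dict equality.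
import Mathlib
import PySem

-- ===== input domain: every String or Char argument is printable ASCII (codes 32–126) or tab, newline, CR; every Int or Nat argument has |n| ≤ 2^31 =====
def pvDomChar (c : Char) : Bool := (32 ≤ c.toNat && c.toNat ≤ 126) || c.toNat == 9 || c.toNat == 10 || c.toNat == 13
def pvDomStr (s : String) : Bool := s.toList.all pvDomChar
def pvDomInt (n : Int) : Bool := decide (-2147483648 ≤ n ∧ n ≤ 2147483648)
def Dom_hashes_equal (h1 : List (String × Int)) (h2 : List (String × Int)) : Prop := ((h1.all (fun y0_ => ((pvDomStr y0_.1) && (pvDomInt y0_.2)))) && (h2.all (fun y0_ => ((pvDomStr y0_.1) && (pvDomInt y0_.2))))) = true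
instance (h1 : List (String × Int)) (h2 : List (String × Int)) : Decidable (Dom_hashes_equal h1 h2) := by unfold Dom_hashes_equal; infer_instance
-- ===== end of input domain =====

-- B replaces A's two symmetric dict scans by one length check plus one directional scan (simpler; return value only, no mutation involved).

-- ===== PORT A =====
-- one loop of A: for c in ks: if c not in other: return False; if d2[c] != d1[c]: return False
def pvScanA (d1 d2 other : PySem.Dict String Int) : List String → Bool
  | [] => true
  | c :: cs =>
    if other.contains c = false then false
    else if d2.get? c ≠ d1.get? c then false
    else pvScanA d1 d2 other cs

def hashes_equal (h1 : List (String × Int)) (h2 : List (String × Int)) : Bool :=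
  let d1 := PySem.Dict.mk h1
  let d2 := PySem.Dict.mk h2
  pvScanA d1 d2 d2 d1.keys && pvScanA d1 d2 d1 d2.keys

-- ===== PORT B =====
def hashes_equal_alt (h1 : List (String × Int)) (h2 : List (String × Int)) : Bool :=
  if h1.length ≠ h2.length then false
  else h1.all (fun p => (PySem.Dict.mk h2).get? p.1 == some p.2)

-- ===== PRECONDITION & SPEC =====
-- Pre_ excludes association lists with duplicate keys: the Python arguments are dicts,
-- whose item lists always have distinct keys, so no Python input is excluded.
def Pre_hashes_equal (h1 : List (String × Int)) (h2 : List (String × Int)) : Prop :=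
  (h1.map Prod.fst).Nodup ∧ (h2.map Prod.fst).Nodup
instance (h1 : List (String × Int)) (h2 : List (String × Int)) : Decidable (Pre_hashes_equal h1 h2) := by unfold Pre_hashes_equal; infer_instance

def pvWitness_hashes_equal : (List (String × Int)) × (List (String × Int)) :=
  ([("a", 1), ("b", 2)], [("b", 2), ("a", 1)])

def Spec_hashes_equal (h1 : List (String × Int)) (h2 : List (String × Int)) (out : Bool) : Prop := out = hashes_equal_alt h1 h2
instance (h1 : List (String × Int)) (h2 : List (String × Int)) (out : Bool) : Decidable (Spec_hashes_equal h1 h2 out) := by unfold Spec_hashes_equal; infer_instance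

-- ===== CLAIM (what is proved, stated in full; the proofs are below) =====
def Claim_equal_hashes_equal : Prop := ∀ (h1 : List (String × Int)) (h2 : List (String × Int)), Dom_hashes_equal h1 h2 → Pre_hashes_equal h1 h2 → Spec_hashes_equal h1 h2 (hashes_equal h1 h2)

-- ===== LEMMAS AND PROOFS =====

theorem isSome_get?_iff_mem_keys {κ ν : Type} [BEq κ] [LawfulBEq κ] (d : PySem.Dict κ ν) (k : κ) :
    ((d.get? k).isSome = true) ↔ k ∈ d.keys := by
  rw [Option.isSome_iff_ne_none, ne_eq, PySem.Dict.get?_eq_none_iff_not_mem_keys, not_not]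

theorem pvScanA_eq_true_iff (d1 d2 other : PySem.Dict String Int) (ks : List String) :
    pvScanA d1 d2 other ks = true ↔
      ∀ c ∈ ks, ((other.get? c).isSome = true) ∧ d2.get? c = d1.get? c := by
  induction ks with
  | nil => simp [pvScanA]
  | cons c cs ih =>
    simp only [pvScanA, PySem.Dict.contains_eq_isSome_get?, List.mem_cons]
    by_cases hs : (other.get? c).isSome = true
    · by_cases h2 : d2.get? c = d1.get? c
      · rw [if_neg (by simp [hs]), if_neg (by simp [h2]), ih]
        constructor
        · intro h x hx
          rcases hx with rfl | hx
          · exact ⟨hs, h2⟩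
          · exact h x hx
        · intro h x hx; exact h x (Or.inr hx)
      · rw [if_neg (by simp [hs]), if_pos (by simp [h2])]
        simp only [Bool.false_eq_true, false_iff, not_forall]
        exact ⟨c, Or.inl rfl, fun h => h2 h.2⟩
    · rw [if_pos (by simpa using hs)]
      simp only [Bool.false_eq_true, false_iff, not_forall]
      exact ⟨c, Or.inl rfl, fun h => hs h.1⟩

theorem hashes_equal_spec_aux (h1 h2 : List (String × Int))
    (n1 : (h1.map Prod.fst).Nodup) (n2 : (h2.map Prod.fst).Nodup) :
    hashes_equal h1 h2 = hashes_equal_alt h1 h2 := by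
  have keys1 : (PySem.Dict.mk h1).keys = h1.map Prod.fst := by simp [PySem.Dict.keys]
  have keys2 : (PySem.Dict.mk h2).keys = h2.map Prod.fst := by simp [PySem.Dict.keys]
  rw [Bool.eq_iff_iff]
  unfold hashes_equal hashes_equal_alt
  simp only [Bool.and_eq_true, pvScanA_eq_true_iff, keys1, keys2]
  constructor
  · rintro ⟨s1, s2⟩
    -- keys of h1 ⊆ keys of h2 and back
    have sub12 : h1.map Prod.fst ⊆ h2.map Prod.fst := by
      intro c hc
      have := (s1 c hc).1
      rw [isSome_get?_iff_mem_keys, keys2] at this; exact this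
    have sub21 : h2.map Prod.fst ⊆ h1.map Prod.fst := by
      intro c hc
      have := (s2 c hc).1
      rw [isSome_get?_iff_mem_keys, keys1] at this; exact this
    have hlen : h1.length = h2.length := by
      have l1 := (n1.subperm sub12).length_le
      have l2 := (n2.subperm sub21).length_le
      simpa using le_antisymm l1 l2
    rw [if_neg (by simp [hlen])]
    rw [List.all_eq_true]
    intro p hp
    have hk : p.1 ∈ h1.map Prod.fst := List.mem_map.mpr ⟨p, hp, rfl⟩
    have hg1 : (PySem.Dict.mk h1).get? p.1 = some p.2 :=
      PySem.Dict.get?_of_mem_items (d := PySem.Dict.mk h1) hp (by rw [keys1]; exact n1)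
    have := (s1 p.1 hk).2
    rw [hg1] at this
    simp [this]
  · intro hB
    by_cases hlen : h1.length = h2.length
    · rw [if_neg (by simp [hlen]), List.all_eq_true] at hB
      -- the directional scan of h1 holds
      have s1 : ∀ c ∈ h1.map Prod.fst,
          ((PySem.Dict.mk h2).get? c).isSome = true ∧
            (PySem.Dict.mk h2).get? c = (PySem.Dict.mk h1).get? c := by
        intro c hc
        obtain ⟨p, hp, rfl⟩ := List.mem_map.mp hc
        have hg1 : (PySem.Dict.mk h1).get? p.1 = some p.2 :=
          PySem.Dict.get?_of_mem_items (d := PySem.Dict.mk h1) hp (by rw [keys1]; exact n1)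
        have hg2 : (PySem.Dict.mk h2).get? p.1 = some p.2 := by
          have := hB p hp; simpa using this
        exact ⟨by simp [hg2], by rw [hg1, hg2]⟩
      refine ⟨s1, ?_⟩
      -- keys agree as sets, so the second scan follows from the first
      have sub12 : h1.map Prod.fst ⊆ h2.map Prod.fst := by
        intro c hc
        have := (s1 c hc).1
        rw [isSome_get?_iff_mem_keys, keys2] at this; exact this
      have sub21 : h2.map Prod.fst ⊆ h1.map Prod.fst := by
        have sp := n1.subperm sub12
        have hperm : (h1.map Prod.fst).Perm (h2.map Prod.fst) :=
          sp.perm_of_length_le (by simp [hlen])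
        exact fun c hc => hperm.symm.subset hc
      intro c hc
      have hc1 := sub21 hc
      refine ⟨?_, (s1 c hc1).2⟩
      rw [isSome_get?_iff_mem_keys, keys1]; exact hc1
    · rw [if_pos (by simp [hlen])] at hB
      exact absurd hB (by simp)

-- ===== VERDICT (by name: the statement is the Claim_ definition above) =====
theorem hashes_equal_spec : Claim_equal_hashes_equal := by
  intro h1 h2 _ hpre
  exact hashes_equal_spec_aux h1 h2 hpre.1 hpre.2
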